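-- pv_equiv track=rewrite | github.com/chris-henry-holland/python-ProjectEulerSolutions | src/project_euler_solutions/Project_Euler_1_50.py | kPolygonalGenerator
-- ===== SOURCE A (Python) =====
-- from typing import (
--     Dict,
--     List,
--     Tuple,
--     Set,
--     Union,
--     Generator,
--     Callable,
--     Optional,
--     Any,
--     Hashable,
-- )
-- import itertools
--
-- def nthKPolygonalNumber(n: int, k: int) -> int:
--     return (n * ((k - 2) * n - k + 4)) >> 1
--
-- def kPolygonalGenerator(
--     k: int,
--     n_max: Optional[int]=None,
-- ) -> Generator[int, None, None]:
--
--     iter_obj = range(1, n_max + 1) if isinstance(n_max, int) else\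
--             itertools.count(1)
--     for n in iter_obj:
--         yield nthKPolygonalNumber(n, k)
--     return
-- ===== SOURCE B (Python) =====
-- def kPolygonalGenerator(k, n_max=None):
--     # Running-difference generator: val accumulates, delta grows by k-2 each step.
--     val = 0
--     delta = 1
--     n = 1
--     while n_max is None or n <= n_max:
--         val += delta
--         yield val
--         delta += k - 2
--         n += 1
-- ===== Notes on version B (the rewrite author's own statement) =====
-- stated objective: alternative
-- what changed: Replaces the per-term closed-form evaluation (a multiplication and shift per element) with a running second-difference recurrence: maintain val and delta, adding delta each step and incrementing delta by k-2, so no multiplication is performed in the loop.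
import Mathlib
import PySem

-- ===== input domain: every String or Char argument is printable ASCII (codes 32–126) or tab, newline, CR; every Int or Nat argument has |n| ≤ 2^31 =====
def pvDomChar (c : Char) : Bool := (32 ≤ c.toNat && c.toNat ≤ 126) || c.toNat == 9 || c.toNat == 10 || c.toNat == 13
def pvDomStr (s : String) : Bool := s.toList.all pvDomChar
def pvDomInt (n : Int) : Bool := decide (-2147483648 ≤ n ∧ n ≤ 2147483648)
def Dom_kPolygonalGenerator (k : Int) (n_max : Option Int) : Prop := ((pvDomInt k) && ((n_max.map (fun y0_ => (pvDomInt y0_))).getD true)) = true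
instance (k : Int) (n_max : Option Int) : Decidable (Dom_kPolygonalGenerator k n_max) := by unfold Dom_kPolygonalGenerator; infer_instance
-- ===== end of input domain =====

-- B replaces the per-term closed-form evaluation with a running second-difference
-- recurrence (val/delta); equivalence proved for all k whenever n_max is given.
-- Pre_ excludes n_max = none, on which A's generator is infinite (consuming it diverges).


-- ===== PORT A =====
-- helper: nthKPolygonalNumber(n, k) = (n * ((k - 2) * n - k + 4)) >> 1  (>>1 = floordiv by 2)
def nthKPolygonalNumber (n k : Int) : Int :=
  PySem.Int.floordiv (n * ((k - 2) * n - k + 4)) 2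

-- A: iterate n over range(1, n_max+1) and yield the closed form each step.
-- For n_max = None the generator is infinite (excluded by Pre_); the port returns [] there.
def kPolygonalGenerator (k : Int) (n_max : Option Int) : List Int :=
  match n_max with
  | some m => (PySem.List.pyRange 1 (m + 1) 1).map (fun n => nthKPolygonalNumber n k)
  | none => []

-- ===== PORT B =====
-- B's while loop: val += delta; yield val; delta += k-2; runs n_max times (if positive).
def kPolygonalLoop (k : Int) : Nat → Int → Int → List Int
  | 0, _, _ => []
  | t + 1, val, delta =>
      (val + delta) :: kPolygonalLoop k t (val + delta) (delta + (k - 2))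

def kPolygonalGenerator_alt (k : Int) (n_max : Option Int) : List Int :=
  match n_max with
  | some m => kPolygonalLoop k m.toNat 0 1
  | none => []

-- ===== PRECONDITION & SPEC =====
-- Pre_ excludes n_max = none: there A's generator (and B's) is infinite, so A never
-- returns a finite sequence — consuming it diverges.
def Pre_kPolygonalGenerator (k : Int) (n_max : Option Int) : Prop := n_max.isSome = true
instance (k : Int) (n_max : Option Int) : Decidable (Pre_kPolygonalGenerator k n_max) := by unfold Pre_kPolygonalGenerator; infer_instance
def pvWitness_kPolygonalGenerator : Int × Option Int := (5, some 6)

def Spec_kPolygonalGenerator (k : Int) (n_max : Option Int) (out : List Int) : Prop := out = kPolygonalGenerator_alt k n_max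
instance (k : Int) (n_max : Option Int) (out : List Int) : Decidable (Spec_kPolygonalGenerator k n_max out) := by unfold Spec_kPolygonalGenerator; infer_instance

-- ===== CLAIM (what is proved, stated in full; the proofs are below) =====
def Claim_equal_kPolygonalGenerator : Prop := ∀ (k : Int) (n_max : Option Int), Dom_kPolygonalGenerator k n_max → Pre_kPolygonalGenerator k n_max → Spec_kPolygonalGenerator k n_max (kPolygonalGenerator k n_max)

-- ===== LEMMAS AND PROOFS =====

-- the closed form satisfies B's first-difference recurrence
lemma nthK_succ (k n : Int) :
    nthKPolygonalNumber (n + 1) k = nthKPolygonalNumber n k + (1 + n * (k - 2)) := by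
  unfold nthKPolygonalNumber
  rw [PySem.Int.floordiv_eq_ediv_of_pos (by norm_num),
      PySem.Int.floordiv_eq_ediv_of_pos (by norm_num)]
  have h : (n + 1) * ((k - 2) * (n + 1) - k + 4)
      = n * ((k - 2) * n - k + 4) + (1 + n * (k - 2)) * 2 := by ring
  rw [h, Int.add_mul_ediv_right _ _ (by norm_num)]

-- loop invariant: started at (val, delta) = (nthK n0, delta for term n0+1),
-- the loop produces the closed-form terms n0+1 .. n0+t
lemma loop_eq (k : Int) :
    ∀ (t : Nat) (n0 : Int),
      kPolygonalLoop k t (nthKPolygonalNumber n0 k) (1 + n0 * (k - 2))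
        = (PySem.List.pyRange (n0 + 1) (n0 + 1 + t) 1).map (fun n => nthKPolygonalNumber n k) := by
  intro t
  induction t with
  | zero =>
      intro n0
      simp [kPolygonalLoop, PySem.List.pyRange_one_eq_nil (le_refl (n0 + 1))]
  | succ t ih =>
      intro n0
      rw [PySem.List.pyRange_one_cons (by push_cast; omega)]
      have h1 : nthKPolygonalNumber n0 k + (1 + n0 * (k - 2)) = nthKPolygonalNumber (n0 + 1) k :=
        (nthK_succ k n0).symm
      have h2 : 1 + n0 * (k - 2) + (k - 2) = 1 + (n0 + 1) * (k - 2) := by ring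
      simp only [kPolygonalLoop, h1, h2, List.map_cons]
      have h3 : n0 + 1 + ((t : Int) + 1) = (n0 + 1) + 1 + t := by ring
      rw [show ((t + 1 : Nat) : Int) = (t : Int) + 1 by push_cast; ring, h3]
      exact congrArg _ (ih (n0 + 1))

lemma nthK_zero (k : Int) : nthKPolygonalNumber 0 k = 0 := by
  unfold nthKPolygonalNumber
  rw [PySem.Int.floordiv_eq_ediv_of_pos (by norm_num)]
  simp

-- ===== VERDICT (by name: the statement is the Claim_ definition above) =====
theorem kPolygonalGenerator_spec : Claim_equal_kPolygonalGenerator := by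
  intro k n_max _ hpre
  match n_max with
  | none => simp [Pre_kPolygonalGenerator] at hpre
  | some m =>
      show kPolygonalGenerator k (some m) = kPolygonalGenerator_alt k (some m)
      simp only [kPolygonalGenerator, kPolygonalGenerator_alt]
      have h := loop_eq k m.toNat 0
      rw [nthK_zero, zero_mul, add_zero, zero_add] at h
      rw [h]
      by_cases hm : 0 ≤ m
      · rw [show (1 : Int) + (m.toNat : Int) = m + 1 by omega]
      · rw [PySem.List.pyRange_one_eq_nil (by omega),
            PySem.List.pyRange_one_eq_nil (by omega)]
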